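-- pv_equiv track=rewrite | github.com/abc20210708/python_study | COSPro/1/01/q05_whirlpool_num.py | solution
-- ===== SOURCE A (Python) =====
-- def solution(n):
--     res = 0
--
--     if n == 1:
--         return 1
--     if n == 2:
--         return 4
--     else:
--         res = n*2 + (n-1)*4*(n-2) + solution(n-2)
--     return res
-- ===== SOURCE B (Python) =====
-- def solution(n):
--     # Closed-form evaluation of the whirlpool recurrence: O(1) instead of O(n) recursion.
--     if n % 2 == 1:
--         k = (n - 1) // 2
--         return (16*k**3 + 18*k**2 + 8*k + 3) // 3
--     k = (n - 2) // 2
--     return (16*k**3 + 42*k**2 + 38*k + 12) // 3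
-- ===== Notes on version B (the rewrite author's own statement) =====
-- stated objective: faster
-- what changed: Replaced the O(n) two-step recursion by the closed-form cubic polynomial obtained by summing the recurrence terms (one formula per parity).
-- outside the precondition, e.g. on solution(0): A raises RecursionError, B returns 0
import Mathlib
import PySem

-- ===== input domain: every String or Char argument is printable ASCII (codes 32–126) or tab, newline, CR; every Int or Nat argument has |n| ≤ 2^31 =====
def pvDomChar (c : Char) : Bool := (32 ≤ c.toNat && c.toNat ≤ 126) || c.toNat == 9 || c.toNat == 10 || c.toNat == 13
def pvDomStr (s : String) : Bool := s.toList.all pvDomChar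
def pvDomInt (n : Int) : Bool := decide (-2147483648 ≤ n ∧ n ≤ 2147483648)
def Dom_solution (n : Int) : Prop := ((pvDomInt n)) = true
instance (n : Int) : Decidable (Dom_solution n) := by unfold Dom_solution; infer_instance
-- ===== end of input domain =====

-- B replaces A's O(n) two-step recursion by the closed-form cubic polynomial (faster, asymptotic).

-- ===== PORT A =====
-- A recurses n -> n-2 down to the base cases 1 and 2; fuel n.toNat bounds the
-- recursion depth for every n ≥ 1 (for n ≤ 0 Python never terminates; excluded by Pre_).
def solutionGo : Nat → Int → Int
  | 0, _ => 0
  | fuel + 1, n =>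
    if n = 1 then 1
    else if n = 2 then 4
    else n * 2 + (n - 1) * 4 * (n - 2) + solutionGo fuel (n - 2)

def solution (n : Int) : Int := solutionGo n.toNat n

-- ===== PORT B =====
def solution_alt (n : Int) : Int :=
  if PySem.Int.mod n 2 = 1 then
    let k := PySem.Int.floordiv (n - 1) 2
    PySem.Int.floordiv (16 * k ^ 3 + 18 * k ^ 2 + 8 * k + 3) 3
  else
    let k := PySem.Int.floordiv (n - 2) 2
    PySem.Int.floordiv (16 * k ^ 3 + 42 * k ^ 2 + 38 * k + 12) 3

-- ===== PRECONDITION & SPEC =====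
-- Pre_ excludes exactly n ≤ 0, where A's recursion never reaches a base case (RecursionError).
def Pre_solution (n : Int) : Prop := 1 ≤ n
instance (n : Int) : Decidable (Pre_solution n) := by unfold Pre_solution; infer_instance
def pvWitness_solution : Int := 5

def Spec_solution (n : Int) (out : Int) : Prop := out = solution_alt n
instance (n : Int) (out : Int) : Decidable (Spec_solution n out) := by unfold Spec_solution; infer_instance

-- ===== CLAIM (what is proved, stated in full; the proofs are below) =====
def Claim_equal_solution : Prop := ∀ (n : Int), Dom_solution n → Pre_solution n → Spec_solution n (solution n)

-- ===== LEMMAS AND PROOFS =====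

-- three times B's value, written without any division
def pvP (n : Int) : Int :=
  if n % 2 = 1 then
    let k := (n - 1) / 2
    16 * k ^ 3 + 18 * k ^ 2 + 8 * k + 3
  else
    let k := (n - 2) / 2
    16 * k ^ 3 + 42 * k ^ 2 + 38 * k + 12

lemma solution_alt_eq (n : Int) : solution_alt n = (pvP n) / 3 := by
  unfold solution_alt pvP
  simp only [PySem.Int.floordiv_eq_ediv_of_pos (show (0:Int) < 2 by norm_num),
    PySem.Int.floordiv_eq_ediv_of_pos (show (0:Int) < 3 by norm_num),
    PySem.Int.mod_eq_emod_of_pos (show (0:Int) < 2 by norm_num)]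
  split_ifs <;> rfl

lemma solutionGo_mul3 (fuel : Nat) (n : Int) (h1 : 1 ≤ n) (hf : n.toNat ≤ fuel) :
    3 * solutionGo fuel n = pvP n := by
  induction fuel generalizing n with
  | zero => omega
  | succ f ih =>
    rw [solutionGo]
    by_cases h1' : n = 1
    · subst h1'; norm_num [pvP]
    · by_cases h2 : n = 2
      · subst h2; norm_num [pvP]
      · have hn3 : 3 ≤ n := by omega
        simp only [h1', h2, if_false]
        have ih' := ih (n - 2) (by omega) (by omega)
        have hpar : (n - 2) % 2 = n % 2 := by omega
        rcases Int.emod_two_eq_zero_or_one n with hmod | hmod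
        · -- even case: n = 2k + 2 with k = (n-2)/2
          obtain ⟨k, hk⟩ : ∃ k, n = 2 * k + 2 := ⟨(n - 2) / 2, by omega⟩
          have e1 : pvP n = 16 * k ^ 3 + 42 * k ^ 2 + 38 * k + 12 := by
            unfold pvP
            rw [if_neg (by omega)]
            have : (n - 2) / 2 = k := by omega
            rw [this]
          have e2 : pvP (n - 2) = 16 * (k-1) ^ 3 + 42 * (k-1) ^ 2 + 38 * (k-1) + 12 := by
            unfold pvP
            rw [if_neg (by omega)]
            have : (n - 2 - 2) / 2 = k - 1 := by omega
            rw [this]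
          rw [e1]; rw [e2] at ih'
          subst hk; ring_nf; ring_nf at ih'; linarith
        · -- odd case: n = 2k + 1 with k = (n-1)/2
          obtain ⟨k, hk⟩ : ∃ k, n = 2 * k + 1 := ⟨(n - 1) / 2, by omega⟩
          have e1 : pvP n = 16 * k ^ 3 + 18 * k ^ 2 + 8 * k + 3 := by
            unfold pvP
            rw [if_pos (by omega)]
            have : (n - 1) / 2 = k := by omega
            rw [this]
          have e2 : pvP (n - 2) = 16 * (k-1) ^ 3 + 18 * (k-1) ^ 2 + 8 * (k-1) + 3 := by
            unfold pvP
            rw [if_pos (by omega)]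
            have : (n - 2 - 1) / 2 = k - 1 := by omega
            rw [this]
          rw [e1]; rw [e2] at ih'
          subst hk; ring_nf; ring_nf at ih'; linarith

-- ===== VERDICT (by name: the statement is the Claim_ definition above) =====
theorem solution_spec : Claim_equal_solution := by
  intro n _ hpre
  unfold Spec_solution solution
  have h := solutionGo_mul3 n.toNat n hpre (le_refl _)
  rw [solution_alt_eq]
  omega
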